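-- pv_equiv track=rewrite | github.com/szmania/CC-Mappers | mapper_tools/shared_utils.py | create_faction_to_heritages_map
-- ===== SOURCE A (Python) =====
-- from collections import defaultdict, Counter
--
-- def create_faction_to_heritages_map(heritage_to_factions_map):
--     """
--     Creates a reverse map from a faction name to a list of its heritages.
--     """
--     faction_to_heritages = defaultdict(list)
--     if not heritage_to_factions_map:
--         return faction_to_heritages
--
--     for heritage, factions in heritage_to_factions_map.items():
--         for faction in factions:
--             if heritage not in faction_to_heritages[faction]:
--                 faction_to_heritages[faction].append(heritage)
--
--     return dict(faction_to_heritages)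
-- ===== SOURCE B (Python) =====
-- from collections import defaultdict
--
--
-- def create_faction_to_heritages_map(heritage_to_factions_map):
--     """
--     Creates a reverse map from a faction name to a list of its heritages.
--     """
--     if not heritage_to_factions_map:
--         return defaultdict(list)
--
--     # Flatten to (faction, heritage) pairs in traversal order.
--     pairs = [(faction, heritage)
--              for heritage, factions in heritage_to_factions_map.items()
--              for faction in factions]
--     # Group heritages per faction in one pass, duplicates included.
--     groups = {}
--     for faction, heritage in pairs:
--         groups.setdefault(faction, []).append(heritage)
--     # Deduplicate each group, keeping first-occurrence order.
--     return {f: list(dict.fromkeys(hs)) for f, hs in groups.items()}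
-- ===== Notes on version B (the rewrite author's own statement) =====
-- stated objective: alternative
-- what changed: Replaces A's incremental defaultdict with a per-append list membership check by a flatten-then-group pipeline: flatten to a (faction, heritage) pair list, group heritages per faction in one setdefault pass (duplicates kept), then deduplicate each group with dict.fromkeys in a separate pass.
import Mathlib
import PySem

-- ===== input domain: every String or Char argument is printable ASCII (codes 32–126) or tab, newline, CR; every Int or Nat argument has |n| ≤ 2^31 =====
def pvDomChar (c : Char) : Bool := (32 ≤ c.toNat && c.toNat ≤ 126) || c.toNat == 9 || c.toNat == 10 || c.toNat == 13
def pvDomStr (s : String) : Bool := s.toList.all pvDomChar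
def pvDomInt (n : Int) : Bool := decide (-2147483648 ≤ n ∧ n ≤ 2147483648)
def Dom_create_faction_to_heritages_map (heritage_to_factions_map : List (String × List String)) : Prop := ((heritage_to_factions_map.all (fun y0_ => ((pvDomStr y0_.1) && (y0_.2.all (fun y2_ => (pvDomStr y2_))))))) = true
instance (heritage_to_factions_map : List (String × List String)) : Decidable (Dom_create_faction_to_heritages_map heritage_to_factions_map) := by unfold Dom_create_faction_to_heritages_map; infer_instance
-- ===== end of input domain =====

-- B replaces A's incremental membership-checked defaultdict build with a flatten-then-group pipeline: flat (faction, heritage) pair list, one setdefault-append grouping pass, then a dict.fromkeys dedup pass per faction.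


-- ===== PORT A =====
-- 'not heritage_to_factions_map' guard: an empty defaultdict has no items → []
def create_faction_to_heritages_map (heritage_to_factions_map : List (String × List String)) : List (String × List String) :=
  if heritage_to_factions_map = [] then []
  else
    (heritage_to_factions_map.foldl (fun d hf =>
        hf.2.foldl (fun d faction =>
          let cur := d.getD faction []        -- defaultdict(list) access
          if cur.contains hf.1 then d
          else d.insert faction (cur ++ [hf.1])) d)
      PySem.Dict.empty).items

-- ===== PORT B =====
-- the flat (faction, heritage) pair comprehension
def pvPairs (m : List (String × List String)) : List (String × String) :=
  m.flatMap (fun hf => hf.2.map (fun faction => (faction, hf.1)))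

def create_faction_to_heritages_map_alt (heritage_to_factions_map : List (String × List String)) : List (String × List String) :=
  if heritage_to_factions_map = [] then []
  else
    let pairs := pvPairs heritage_to_factions_map
    -- groups.setdefault(faction, []).append(heritage), one pass over the pairs
    let groups := pairs.foldl (fun d p => d.modify p.1 [] (fun hs => hs ++ [p.2])) PySem.Dict.empty
    -- dict.fromkeys dedup of each group, insertion order of groups kept
    groups.items.map (fun p => (p.1, PySem.List.dedup p.2))

-- ===== PRECONDITION & SPEC =====
def Spec_create_faction_to_heritages_map (heritage_to_factions_map : List (String × List String)) (out : List (String × List String)) : Prop := out = create_faction_to_heritages_map_alt heritage_to_factions_map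
instance (heritage_to_factions_map : List (String × List String)) (out : List (String × List String)) : Decidable (Spec_create_faction_to_heritages_map heritage_to_factions_map out) := by unfold Spec_create_faction_to_heritages_map; infer_instance

-- ===== CLAIM (what is proved, stated in full; the proofs are below) =====
def Claim_equal_create_faction_to_heritages_map : Prop := ∀ (heritage_to_factions_map : List (String × List String)), Dom_create_faction_to_heritages_map heritage_to_factions_map → Spec_create_faction_to_heritages_map heritage_to_factions_map (create_faction_to_heritages_map heritage_to_factions_map)

-- ===== LEMMAS AND PROOFS =====

-- A's inner loop body, over the flattened (faction, heritage) pairs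
def stepA (d : PySem.Dict String (List String)) (p : String × String) : PySem.Dict String (List String) :=
  let cur := d.getD p.1 []
  if cur.contains p.2 then d else d.insert p.1 (cur ++ [p.2])

-- B's result as a function of the flat pair list
def pvBuild (ps : List (String × String)) : List (String × List String) :=
  (PySem.List.dedup (ps.map Prod.fst)).map (fun f =>
    (f, PySem.List.dedup ((ps.filter (fun p => p.1 == f)).map Prod.snd)))

theorem foldl_flatMap' {α β γ : Type} (g : α → List β) (f : γ → β → γ) (l : List α) (init : γ) :
    (l.flatMap g).foldl f init = l.foldl (fun acc x => (g x).foldl f acc) init := by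
  induction l generalizing init with
  | nil => rfl
  | cons a t ih => simp [List.foldl_append, ih]

theorem dedup_append_singleton {α : Type} [DecidableEq α] (l : List α) (x : α) :
    PySem.List.dedup (l ++ [x]) =
      if x ∈ l then PySem.List.dedup l else PySem.List.dedup l ++ [x] := by
  simp only [PySem.List.dedup_eq_ofList, PySem.Set.ofList_append_singleton]
  by_cases hx : x ∈ l
  · rw [PySem.Set.add_of_mem (by simpa [PySem.Set.mem_ofList] using hx)]
    simp [hx]
  · rw [PySem.Set.add_of_not_mem (by simpa [PySem.Set.mem_ofList] using hx)]
    simp [hx]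

theorem build_keys (ps : List (String × String)) :
    (pvBuild ps).map Prod.fst = PySem.List.dedup (ps.map Prod.fst) := by
  simp [pvBuild, List.map_map, Function.comp_def]

-- the core invariant: A's fold over the flat pairs produces exactly B's grouping
theorem fold_eq_build (ps : List (String × String)) :
    (ps.foldl stepA PySem.Dict.empty).items = pvBuild ps := by
  induction ps using List.reverseRecOn with
  | nil => simp [pvBuild, PySem.List.dedup, PySem.Dict.empty]
  | append_singleton ps p ih =>
    obtain ⟨f, h⟩ := p
    rw [List.foldl_append, List.foldl_cons, List.foldl_nil]
    set D := ps.foldl stepA PySem.Dict.empty with hD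
    have hkeys : D.keys = PySem.List.dedup (ps.map Prod.fst) := by
      have h1 := build_keys ps
      rw [← ih] at h1
      simpa [PySem.Dict.keys] using h1
    have hnd : D.keys.Nodup := by rw [hkeys]; exact PySem.List.nodup_dedup _
    simp only [stepA]
    by_cases hf : f ∈ ps.map Prod.fst
    · -- faction already present
      have hmemD : (f, PySem.List.dedup ((ps.filter (fun p => p.1 == f)).map Prod.snd)) ∈ D.items := by
        rw [ih]
        exact List.mem_map_of_mem (by simpa [PySem.List.mem_dedup] using hf)
      have hget : D.getD f [] = PySem.List.dedup ((ps.filter (fun p => p.1 == f)).map Prod.snd) :=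
        PySem.Dict.getD_of_mem_items D hmemD hnd []
      have hcont : D.contains f = true := by
        simp [PySem.Dict.contains_eq_decide_mem_keys, hkeys, hf]
      by_cases hh : h ∈ (ps.filter (fun p => p.1 == f)).map Prod.snd
      · -- heritage already recorded: A leaves the dict unchanged; B's dedup absorbs it
        have hmem : (D.getD f []).contains h = true := by
          simp only [hget, List.contains_eq_mem, PySem.List.mem_dedup]
          simpa using hh
        have hbuild : pvBuild (ps ++ [(f, h)]) = pvBuild ps := by
          unfold pvBuild
          rw [List.map_append, show List.map Prod.fst [(f, h)] = [f] from rfl,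
            dedup_append_singleton, if_pos hf]
          apply List.map_congr_left
          intro g hg
          by_cases hgf : g = f
          · subst hgf
            congr 1
            rw [List.filter_append,
              show List.filter (fun p => p.1 == g) [(g, h)] = [(g, h)] from by simp,
              List.map_append, show List.map Prod.snd [(g, h)] = [h] from rfl,
              dedup_append_singleton, if_pos hh]
          · congr 2
            simp [List.filter_append, Ne.symm hgf]
        rw [if_pos hmem, ih, hbuild]
      · -- new heritage for an existing faction: A appends; B's dedup keeps it last
        have hmem : ¬ ((D.getD f []).contains h = true) := by
          simp only [hget, List.contains_eq_mem, PySem.List.mem_dedup]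
          simpa using hh
        have hbuild : pvBuild (ps ++ [(f, h)]) =
            (pvBuild ps).map (fun p => if p.1 == f then (f, D.getD f [] ++ [h]) else p) := by
          unfold pvBuild
          rw [List.map_append, show List.map Prod.fst [(f, h)] = [f] from rfl,
            dedup_append_singleton, if_pos hf, List.map_map]
          apply List.map_congr_left
          intro g hg
          by_cases hgf : g = f
          · subst hgf
            simp only [Function.comp, beq_self_eq_true, if_true, hget]
            congr 1
            rw [List.filter_append,
              show List.filter (fun p => p.1 == g) [(g, h)] = [(g, h)] from by simp,
              List.map_append, show List.map Prod.snd [(g, h)] = [h] from rfl,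
              dedup_append_singleton, if_neg hh]
          · have hb : (g == f) = false := by simp [hgf]
            simp only [Function.comp, hb, Bool.false_eq_true, if_false]
            congr 2
            simp [List.filter_append, Ne.symm hgf]
        rw [if_neg hmem, PySem.Dict.items_insert_of_contains D _ hcont, ih, hbuild]
    · -- fresh faction: both sides append a new entry
      have hcont : D.contains f = false := by
        simp [PySem.Dict.contains_eq_decide_mem_keys, hkeys, hf]
      have hget : D.getD f [] = [] := PySem.Dict.getD_of_not_contains D [] hcont
      have hfilnil : ps.filter (fun p => p.1 == f) = [] := by
        rw [List.filter_eq_nil_iff]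
        intro p hp hpf
        have hpe : p.1 = f := by simpa using hpf
        exact hf (hpe ▸ List.mem_map_of_mem hp)
      have hbuild : pvBuild (ps ++ [(f, h)]) = pvBuild ps ++ [(f, [h])] := by
        unfold pvBuild
        rw [List.map_append, show List.map Prod.fst [(f, h)] = [f] from rfl,
          dedup_append_singleton, if_neg hf, List.map_append]
        congr 1
        · apply List.map_congr_left
          intro g hg
          have hgf : g ≠ f := by
            intro e; subst e
            exact hf (by simpa [PySem.List.mem_dedup] using hg)
          congr 2
          simp [List.filter_append, Ne.symm hgf]
        · rw [show List.map (fun f' => (f', PySem.List.dedup ((List.filter (fun p => p.1 == f') (ps ++ [(f, h)])).map Prod.snd))) [f] = [(f, PySem.List.dedup ((List.filter (fun p => p.1 == f) (ps ++ [(f, h)])).map Prod.snd))] from rfl,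
            List.filter_append, hfilnil,
            show List.filter (fun p => p.1 == f) [(f, h)] = [(f, h)] from by simp]
          simp [PySem.List.dedup, PySem.Set.ofList]
      rw [hget, if_neg (by simp), PySem.Dict.items_insert_of_not_contains D _ hcont, ih, hbuild, List.nil_append]

-- B's grouping loop produces exactly the pvBuild grouping
theorem alt_groups_eq_build (ps : List (String × String)) :
    ((ps.foldl (fun d p => d.modify p.1 [] (fun hs => hs ++ [p.2])) PySem.Dict.empty).items.map
      (fun p => (p.1, PySem.List.dedup p.2))) = pvBuild ps := by
  set G := ps.foldl (fun d p => d.modify p.1 [] (fun hs => hs ++ [p.2])) PySem.Dict.empty with hG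
  have hnd : G.keys.Nodup :=
    PySem.Dict.nodup_keys_foldl_modify_key ps Prod.fst [] (fun d p hs => hs ++ [p.2])
      PySem.Dict.empty PySem.Dict.nodup_keys_empty
  have hkeys : G.keys = PySem.List.dedup (ps.map Prod.fst) := by
    rw [hG, PySem.Dict.keys_foldl_modify_key]
    simp [PySem.Dict.keys_empty, PySem.Set.update, PySem.Set.ofList_eq_foldl]
  have hget : ∀ f, G.getD f [] = (ps.filter (fun p => p.1 == f)).map (·.2) := by
    intro f
    rw [hG, PySem.Dict.getD_foldl_modify_append, PySem.Dict.getD_empty, List.nil_append]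
  rw [PySem.Dict.items_eq_map_keys G hnd [], List.map_map, hkeys]
  unfold pvBuild
  apply List.map_congr_left
  intro g _
  simp [hget g]

-- ===== VERDICT (by name: the statement is the Claim_ definition above) =====
theorem create_faction_to_heritages_map_spec : Claim_equal_create_faction_to_heritages_map := by
  intro m _
  unfold Spec_create_faction_to_heritages_map
  unfold create_faction_to_heritages_map create_faction_to_heritages_map_alt
  by_cases hm : m = []
  · simp [hm]
  · simp only [hm, if_false]
    have bridgeA : m.foldl (fun d hf =>
        hf.2.foldl (fun d faction =>
          let cur := d.getD faction []
          if cur.contains hf.1 then d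
          else d.insert faction (cur ++ [hf.1])) d) PySem.Dict.empty
        = (pvPairs m).foldl stepA PySem.Dict.empty := by
      rw [pvPairs, foldl_flatMap']
      simp only [List.foldl_map]
      rfl
    rw [bridgeA, fold_eq_build, ← alt_groups_eq_build]
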